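-- pv_equiv track=rewrite | github.com/rifachnia/Elderglade | eldergame.py | find_valid_swap
-- ===== SOURCE A (Python) =====
-- def find_valid_swap(board):
--     rows = len(board)
--     cols = len(board[0]) if rows > 0 else 0
--
--     def is_valid_position(r, c):
--         return 0 <= r < rows and 0 <= c < cols
--
--
--     def is_match(bd):
--         # Horizontal matches
--         for r in range(rows):
--             for c in range(cols-2):
--                 if (is_valid_position(r, c) and
--                     is_valid_position(r, c+1) and
--                     is_valid_position(r, c+2)):
--                     if bd[r][c] == bd[r][c+1] == bd[r][c+2]:
--                         return True
--         # Vertical matches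
--         for r in range(rows-2):
--             for c in range(cols):
--                 if (is_valid_position(r, c) and
--                     is_valid_position(r+1, c) and
--                     is_valid_position(r+2, c)):
--                     if bd[r][c] == bd[r+1][c] == bd[r+2][c]:
--                         return True
--         return False
--
--     for r in range(rows):
--         for c in range(cols):
--             # Right swap
--             if c+1 < cols:
--                 bd = [row[:] for row in board]
--                 if (is_valid_position(r, c) and is_valid_position(r, c+1)):
--                     bd[r][c], bd[r][c+1] = bd[r][c+1], bd[r][c]
--                     if is_match(bd):
--                         return (r, c, r, c+1)
--             # Down swap
--             if r+1 < rows: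
--                 bd = [row[:] for row in board]
--                 if (is_valid_position(r, c) and is_valid_position(r+1, c)):
--                     bd[r][c], bd[r+1][c] = bd[r+1][c], bd[r][c]
--                     if is_match(bd):
--                         return (r, c, r+1, c)
--     return None
-- ===== SOURCE B (Python) =====
-- def find_valid_swap(board):
--     rows = len(board)
--     cols = len(board[0]) if rows > 0 else 0
--
--     def val(r1, c1, r2, c2, r, c):
--         # cell (r, c) of the board with (r1,c1) and (r2,c2) swapped (no copy)
--         if r == r1 and c == c1:
--             return board[r2][c2]
--         if r == r2 and c == c2:
--             return board[r1][c1]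
--         return board[r][c]
--
--     # matching triples of the ORIGINAL board, as (r, c, horizontal?); at most 13 are
--     # ever needed: a swap touches two cells, and at most 12 distinct triples can run
--     # through two cells, so 13 collected matches guarantee a survivor for every swap.
--     matches = []
--     for r in range(rows):
--         if len(matches) >= 13:
--             break
--         for c in range(cols - 2):
--             if len(matches) >= 13:
--                 break
--             if board[r][c] == board[r][c + 1] == board[r][c + 2]:
--                 matches.append((r, c, True))
--     for r in range(rows - 2):
--         if len(matches) >= 13:
--             break
--         for c in range(cols):
--             if len(matches) >= 13:
--                 break
--             if board[r][c] == board[r + 1][c] == board[r + 2][c]: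
--                 matches.append((r, c, False))
--
--     def survives(r1, c1, r2, c2):
--         # some original match touches neither swapped cell, so it is still there
--         if len(matches) >= 13:
--             return True
--         for (r, c, horiz) in matches:
--             cells = ((r, c), (r, c + 1), (r, c + 2)) if horiz else ((r, c), (r + 1, c), (r + 2, c))
--             if (r1, c1) not in cells and (r2, c2) not in cells:
--                 return True
--         return False
--
--     def creates(r1, c1, r2, c2):
--         # a line of three through one of the swapped cells, on the swapped values
--         for (r, c) in ((r1, c1), (r2, c2)):
--             for cc in range(c - 2, c + 1):
--                 if 0 <= cc and cc + 2 < cols and \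
--                    val(r1, c1, r2, c2, r, cc) == val(r1, c1, r2, c2, r, cc + 1) == val(r1, c1, r2, c2, r, cc + 2):
--                     return True
--             for rr in range(r - 2, r + 1):
--                 if 0 <= rr and rr + 2 < rows and \
--                    val(r1, c1, r2, c2, rr, c) == val(r1, c1, r2, c2, rr + 1, c) == val(r1, c1, r2, c2, rr + 2, c):
--                     return True
--         return False
--
--     for r in range(rows):
--         for c in range(cols):
--             if c + 1 < cols and (survives(r, c, r, c + 1) or creates(r, c, r, c + 1)):
--                 return (r, c, r, c + 1)
--             if r + 1 < rows and (survives(r, c, r + 1, c) or creates(r, c, r + 1, c)):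
--                 return (r, c, r + 1, c)
--     return None
-- ===== Notes on version B (the rewrite author's own statement) =====
-- stated objective: faster
-- what changed: Instead of copying the whole board and rescanning every triple for each candidate swap, B collects at most 13 of the original board's matching triples once (13 guarantee a survivor for any swap, since at most 12 distinct triples can touch the two swapped cells) and, per swap, checks only whether a collected match avoids the swapped cells or a new line of three runs through one of them, read through a no-copy swap-aware accessor.
-- outside the precondition, e.g. on find_valid_swap([[1, 2, 1, 1], [1]]): A returns (0, 0, 0, 1), B raises IndexError
import Mathlib
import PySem

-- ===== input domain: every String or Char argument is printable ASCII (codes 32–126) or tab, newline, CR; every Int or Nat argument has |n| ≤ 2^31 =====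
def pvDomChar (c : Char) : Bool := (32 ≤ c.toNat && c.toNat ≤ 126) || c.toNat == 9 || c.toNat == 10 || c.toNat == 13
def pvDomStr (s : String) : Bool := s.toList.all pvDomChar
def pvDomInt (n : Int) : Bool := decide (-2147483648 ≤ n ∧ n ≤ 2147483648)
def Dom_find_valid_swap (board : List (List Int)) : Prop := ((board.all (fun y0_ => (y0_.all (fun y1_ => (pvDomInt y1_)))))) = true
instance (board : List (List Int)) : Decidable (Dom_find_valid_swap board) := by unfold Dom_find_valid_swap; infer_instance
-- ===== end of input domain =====

-- B replaces A's per-swap board copy + full-board rescan by one collection of the original board's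
-- matching triples plus per-swap local checks through the two swapped cells (objective: faster).

-- ===== PORT A =====
-- bd[r][c]; every read/write index below is guarded in range by A's own code under Pre_, so the
-- defaults of pyGetD and the .toNat of pvSetA are unreachable there (indices are nonnegative range values).
def pvCellA (b : List (List Int)) (r c : Int) : Int :=
  PySem.List.pyGetD (PySem.List.pyGetD b r []) c 0

def pvValidA (rows cols r c : Int) : Bool :=
  decide (0 ≤ r) && decide (r < rows) && decide (0 ≤ c) && decide (c < cols)

def pvIsMatchA (bd : List (List Int)) (rows cols : Int) : Bool :=
  ((PySem.List.pyRange 0 rows 1).any fun r =>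
    (PySem.List.pyRange 0 (cols - 2) 1).any fun c =>
      pvValidA rows cols r c && pvValidA rows cols r (c+1) && pvValidA rows cols r (c+2) &&
      (pvCellA bd r c == pvCellA bd r (c+1) && pvCellA bd r (c+1) == pvCellA bd r (c+2)))
  ||
  ((PySem.List.pyRange 0 (rows - 2) 1).any fun r =>
    (PySem.List.pyRange 0 cols 1).any fun c =>
      pvValidA rows cols r c && pvValidA rows cols (r+1) c && pvValidA rows cols (r+2) c &&
      (pvCellA bd r c == pvCellA bd (r+1) c && pvCellA bd (r+1) c == pvCellA bd (r+2) c))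

-- bd[r][c] = v  (r, c nonnegative and in range wherever A executes it under Pre_)
def pvSetA (b : List (List Int)) (r c : Int) (v : Int) : List (List Int) :=
  b.set r.toNat ((PySem.List.pyGetD b r []).set c.toNat v)

-- bd = [row[:] for row in board]; bd[r1][c1], bd[r2][c2] = bd[r2][c2], bd[r1][c1]
def pvSwapA (b : List (List Int)) (r1 c1 r2 c2 : Int) : List (List Int) :=
  let v1 := pvCellA b r2 c2
  let v2 := pvCellA b r1 c1
  pvSetA (pvSetA b r1 c1 v1) r2 c2 v2

def find_valid_swap (board : List (List Int)) : Option (List Int) :=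
  let rows : Int := PySem.List.len board
  let cols : Int := if rows > 0 then PySem.List.len (PySem.List.pyGetD board 0 []) else 0
  (PySem.List.pyRange 0 rows 1).findSome? fun r =>
    (PySem.List.pyRange 0 cols 1).findSome? fun c =>
      (if c + 1 < cols then
        (if pvValidA rows cols r c && pvValidA rows cols r (c+1) then
          (if pvIsMatchA (pvSwapA board r c r (c+1)) rows cols then some [r, c, r, c+1] else none)
         else none)
       else none).orElse fun _ =>
      (if r + 1 < rows then
        (if pvValidA rows cols r c && pvValidA rows cols (r+1) c then
          (if pvIsMatchA (pvSwapA board r c (r+1) c) rows cols then some [r, c, r+1, c] else none)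
         else none)
       else none)

-- ===== PORT B =====
-- board[r][c]; B only reads guarded in-range nonnegative indices under Pre_, so defaults are unreachable.
def pvCellB (b : List (List Int)) (r c : Int) : Int :=
  PySem.List.pyGetD (PySem.List.pyGetD b r []) c 0

-- val(r1, c1, r2, c2, r, c): cell (r,c) of the board with (r1,c1) and (r2,c2) swapped (no copy)
def pvValB (b : List (List Int)) (r1 c1 r2 c2 r c : Int) : Int :=
  if r = r1 ∧ c = c1 then pvCellB b r2 c2
  else if r = r2 ∧ c = c2 then pvCellB b r1 c1
  else pvCellB b r c

-- matching triples of the ORIGINAL board, as (r, c, horizontal?); collection stops at 13 —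
-- at most 12 distinct triples can run through the two cells of a swap, so 13 guarantee a survivor
def pvMatches13B (b : List (List Int)) (rows cols : Int) : List (Int × Int × Bool) :=
  let ms := (PySem.List.pyRange 0 rows 1).foldl (fun ms r =>
    if ms.length ≥ 13 then ms else
    (PySem.List.pyRange 0 (cols - 2) 1).foldl (fun ms c =>
      if ms.length ≥ 13 then ms else
      if pvCellB b r c = pvCellB b r (c+1) ∧ pvCellB b r (c+1) = pvCellB b r (c+2)
      then ms ++ [(r, c, true)] else ms) ms) []
  (PySem.List.pyRange 0 (rows - 2) 1).foldl (fun ms r =>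
    if ms.length ≥ 13 then ms else
    (PySem.List.pyRange 0 cols 1).foldl (fun ms c =>
      if ms.length ≥ 13 then ms else
      if pvCellB b r c = pvCellB b (r+1) c ∧ pvCellB b (r+1) c = pvCellB b (r+2) c
      then ms ++ [(r, c, false)] else ms) ms) ms

def pvCellsB (t : Int × Int × Bool) : List (Int × Int) :=
  match t with
  | (r, c, true)  => [(r, c), (r, c+1), (r, c+2)]
  | (r, c, false) => [(r, c), (r+1, c), (r+2, c)]

-- some original match touches neither swapped cell, so it is still there after the swap
def pvSurvivesB (ms : List (Int × Int × Bool)) (r1 c1 r2 c2 : Int) : Bool :=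
  if ms.length ≥ 13 then true
  else ms.any fun t => !(pvCellsB t).contains (r1, c1) && !(pvCellsB t).contains (r2, c2)

-- a line of three through one of the swapped cells, on the swapped values
def pvCreatesB (b : List (List Int)) (rows cols r1 c1 r2 c2 : Int) : Bool :=
  [(r1, c1), (r2, c2)].any fun p =>
    ((PySem.List.pyRange (p.2 - 2) (p.2 + 1) 1).any fun cc =>
      decide (0 ≤ cc) && decide (cc + 2 < cols) &&
      (pvValB b r1 c1 r2 c2 p.1 cc == pvValB b r1 c1 r2 c2 p.1 (cc+1) &&
       pvValB b r1 c1 r2 c2 p.1 (cc+1) == pvValB b r1 c1 r2 c2 p.1 (cc+2)))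
    ||
    ((PySem.List.pyRange (p.1 - 2) (p.1 + 1) 1).any fun rr =>
      decide (0 ≤ rr) && decide (rr + 2 < rows) &&
      (pvValB b r1 c1 r2 c2 rr p.2 == pvValB b r1 c1 r2 c2 (rr+1) p.2 &&
       pvValB b r1 c1 r2 c2 (rr+1) p.2 == pvValB b r1 c1 r2 c2 (rr+2) p.2))

def find_valid_swap_alt (board : List (List Int)) : Option (List Int) :=
  let rows : Int := PySem.List.len board
  let cols : Int := if rows > 0 then PySem.List.len (PySem.List.pyGetD board 0 []) else 0
  let ms := pvMatches13B board rows cols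
  (PySem.List.pyRange 0 rows 1).findSome? fun r =>
    (PySem.List.pyRange 0 cols 1).findSome? fun c =>
      if c + 1 < cols ∧ (pvSurvivesB ms r c r (c+1) || pvCreatesB board rows cols r c r (c+1)) = true
      then some [r, c, r, c+1]
      else if r + 1 < rows ∧ (pvSurvivesB ms r c (r+1) c || pvCreatesB board rows cols r c (r+1) c) = true
      then some [r, c, r+1, c]
      else none

-- ===== PRECONDITION & SPEC =====
-- Pre_ excludes ragged boards whose first row is longer than some later row: on those A indexes past
-- the short row and raises IndexError, except on a few where an early swap yields a match before the
-- short row is ever scanned and A still returns (see claim cites); B's one upfront scan of all rows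
-- raises there, so those boards are excluded too.
def Pre_find_valid_swap (board : List (List Int)) : Prop :=
  ∀ row ∈ board, (board.headD []).length ≤ row.length
instance (board : List (List Int)) : Decidable (Pre_find_valid_swap board) := by
  unfold Pre_find_valid_swap; infer_instance

def pvWitness_find_valid_swap : List (List Int) := [[1, 1, 2], [2, 1, 1], [1, 2, 2]]

def Spec_find_valid_swap (board : List (List Int)) (out : Option (List Int)) : Prop := out = find_valid_swap_alt board
instance (board : List (List Int)) (out : Option (List Int)) : Decidable (Spec_find_valid_swap board out) := by unfold Spec_find_valid_swap; infer_instance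

-- ===== CLAIM (what is proved, stated in full; the proofs are below) =====
def Claim_equal_find_valid_swap : Prop := ∀ (board : List (List Int)), Dom_find_valid_swap board → Pre_find_valid_swap board → Spec_find_valid_swap board (find_valid_swap board)

-- ===== LEMMAS AND PROOFS =====

-- proof-side: the FULL list of matching triples (what the capped collection is a prefix of)
def pvMatchesB (b : List (List Int)) (rows cols : Int) : List (Int × Int × Bool) :=
  ((PySem.List.pyRange 0 rows 1).flatMap fun r =>
    (PySem.List.pyRange 0 (cols - 2) 1).filterMap fun c =>
      if pvCellB b r c = pvCellB b r (c+1) ∧ pvCellB b r (c+1) = pvCellB b r (c+2)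
      then some (r, c, true) else none)
  ++
  ((PySem.List.pyRange 0 (rows - 2) 1).flatMap fun r =>
    (PySem.List.pyRange 0 cols 1).filterMap fun c =>
      if pvCellB b r c = pvCellB b (r+1) c ∧ pvCellB b (r+1) c = pvCellB b (r+2) c
      then some (r, c, false) else none)

-- valid start positions of a horizontal / vertical triple
def pvHtri (rows cols r c : Int) : Prop := 0 ≤ r ∧ r < rows ∧ 0 ≤ c ∧ c + 2 < cols
def pvVtri (rows cols r c : Int) : Prop := 0 ≤ r ∧ r + 2 < rows ∧ 0 ≤ c ∧ c < cols

-- the three-equal-values conditions, on a board and on the virtually swapped board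
def pvHM (bd : List (List Int)) (r c : Int) : Prop :=
  pvCellA bd r c = pvCellA bd r (c+1) ∧ pvCellA bd r (c+1) = pvCellA bd r (c+2)
def pvVM (bd : List (List Int)) (r c : Int) : Prop :=
  pvCellA bd r c = pvCellA bd (r+1) c ∧ pvCellA bd (r+1) c = pvCellA bd (r+2) c
def pvHMv (b : List (List Int)) (r1 c1 r2 c2 r c : Int) : Prop :=
  pvValB b r1 c1 r2 c2 r c = pvValB b r1 c1 r2 c2 r (c+1) ∧
  pvValB b r1 c1 r2 c2 r (c+1) = pvValB b r1 c1 r2 c2 r (c+2)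
def pvVMv (b : List (List Int)) (r1 c1 r2 c2 r c : Int) : Prop :=
  pvValB b r1 c1 r2 c2 r c = pvValB b r1 c1 r2 c2 (r+1) c ∧
  pvValB b r1 c1 r2 c2 (r+1) c = pvValB b r1 c1 r2 c2 (r+2) c

theorem pvIsMatchA_iff (bd : List (List Int)) (rows cols : Int) :
    pvIsMatchA bd rows cols = true ↔
      (∃ r c, pvHtri rows cols r c ∧ pvHM bd r c) ∨ (∃ r c, pvVtri rows cols r c ∧ pvVM bd r c) := by
  unfold pvIsMatchA pvValidA
  simp only [Bool.or_eq_true, List.any_eq_true, PySem.List.mem_pyRange_one, Bool.and_eq_true,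
    decide_eq_true_eq, beq_iff_eq, pvHtri, pvVtri, pvHM, pvVM]
  constructor
  · rintro (⟨r, hr, c, hc, hg, he⟩ | ⟨r, hr, c, hc, hg, he⟩)
    · exact Or.inl ⟨r, c, ⟨by omega, by omega, by omega, by omega⟩, he⟩
    · exact Or.inr ⟨r, c, ⟨by omega, by omega, by omega, by omega⟩, he⟩
  · rintro (⟨r, c, h, he⟩ | ⟨r, c, h, he⟩)
    · refine Or.inl ⟨r, ?_, c, ?_, ?_, he⟩ <;> omega
    · refine Or.inr ⟨r, ?_, c, ?_, ?_, he⟩ <;> omega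

theorem pvMatchesB_mem (b : List (List Int)) (rows cols : Int) (t : Int × Int × Bool) :
    t ∈ pvMatchesB b rows cols ↔
      (∃ r c, pvHtri rows cols r c ∧ pvHM b r c ∧ t = (r, c, true)) ∨
      (∃ r c, pvVtri rows cols r c ∧ pvVM b r c ∧ t = (r, c, false)) := by
  unfold pvMatchesB
  rw [show pvCellB = pvCellA from rfl]
  simp only [List.mem_append, List.mem_flatMap, List.mem_filterMap, PySem.List.mem_pyRange_one,
    pvHtri, pvVtri, pvHM, pvVM]
  constructor
  · rintro (⟨r, hr, c, hc, he⟩ | ⟨r, hr, c, hc, he⟩) <;> split_ifs at he with h <;>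
      simp only [Option.some.injEq] at he
    · exact Or.inl ⟨r, c, by omega, h, he.symm⟩
    · exact Or.inr ⟨r, c, by omega, h, he.symm⟩
  · rintro (⟨r, c, hb, h, he⟩ | ⟨r, c, hb, h, he⟩)
    · exact Or.inl ⟨r, by omega, c, by omega, by rw [if_pos h, he]⟩
    · exact Or.inr ⟨r, by omega, c, by omega, by rw [if_pos h, he]⟩

-- cell read at Option level
theorem pvCellA_getD (b : List (List Int)) (r c : Int) (hr : 0 ≤ r) (hc : 0 ≤ c) :
    pvCellA b r c = ((b[r.toNat]?.getD [])[c.toNat]?).getD 0 := by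
  unfold pvCellA
  rw [show r = ((r.toNat : Nat) : Int) by omega, show c = ((c.toNat : Nat) : Int) by omega]
  rw [PySem.List.pyGetD_natCast, PySem.List.pyGetD_natCast]
  rw [List.getD_eq_getElem?_getD, List.getD_eq_getElem?_getD]
  simp only [Int.toNat_natCast]

theorem pvRowEq (b : List (List Int)) (ri : Int) (hri : 0 ≤ ri) :
    PySem.List.pyGetD b ri [] = b[ri.toNat]?.getD [] := by
  rw [show ri = ((ri.toNat : Nat) : Int) by omega, PySem.List.pyGetD_natCast,
    List.getD_eq_getElem?_getD]
  simp only [Int.toNat_natCast]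

theorem pvCellA_setA (b : List (List Int)) (ri ci : Int) (v : Int)
    (hri : 0 ≤ ri) (hri' : ri.toNat < b.length) (hci : 0 ≤ ci)
    (hci' : ci.toNat < (b[ri.toNat]?.getD []).length)
    (r c : Int) (hr : 0 ≤ r) (hc : 0 ≤ c) :
    pvCellA (pvSetA b ri ci v) r c = if r = ri ∧ c = ci then v else pvCellA b r c := by
  have e1 : ri.toNat = r.toNat ↔ r = ri := by omega
  have e2 : ci.toNat = c.toNat ↔ c = ci := by omega
  unfold pvSetA
  rw [pvCellA_getD _ r c hr hc, pvCellA_getD b r c hr hc, pvRowEq b ri hri]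
  rw [List.getElem?_set]
  by_cases h1 : r = ri
  · rw [if_pos (e1.mpr h1), if_pos (by omega)]
    simp only [Option.getD_some]
    rw [List.getElem?_set]
    by_cases h2 : c = ci
    · rw [if_pos (e2.mpr h2), if_pos (by omega), if_pos ⟨h1, h2⟩]
      simp
    · rw [if_neg (fun hh => h2 (e2.mp hh)), if_neg (fun hh => h2 hh.2)]
      rw [h1, e1.mpr h1]
  · rw [if_neg (fun hh => h1 (e1.mp hh)), if_neg (fun hh => h1 hh.1)]

theorem pvRowLen (board : List (List Int)) (hPre : Pre_find_valid_swap board)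
    (n : Nat) (hn : n < board.length) :
    (board.headD []).length ≤ (board[n]?.getD []).length := by
  rw [List.getElem?_eq_getElem hn, Option.getD_some]
  exact hPre _ (List.getElem_mem hn)

-- capped collection: a guarded fold keeps the first 13 hits of a filterMap
theorem pvCapFold {A T : Type} (P : A → Prop) [DecidablePred P] (e : A → T)
    (l : List A) (acc : List T) (h : acc.length ≤ 13) :
    l.foldl (fun a x => if a.length ≥ 13 then a else if P x then a ++ [e x] else a) acc
      = (acc ++ l.filterMap fun x => if P x then some (e x) else none).take 13 := by
  induction l generalizing acc with
  | nil => simp [List.take_of_length_le h]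
  | cons x l ih =>
    by_cases hp : P x
    · simp only [List.foldl_cons, List.filterMap_cons, if_pos hp]
      by_cases hfull : acc.length ≥ 13
      · rw [if_pos hfull, ih acc h]
        rw [List.take_append, List.take_append, List.take_of_length_le h]
        have h0 : 13 - acc.length = 0 := by omega
        rw [h0]
        simp
      · rw [if_neg hfull, ih (acc ++ [e x]) (by rw [List.length_append]; simp; omega)]
        rw [List.append_assoc]
        rfl
    · simp only [List.foldl_cons, List.filterMap_cons, if_neg hp, ite_self]
      exact ih acc h

theorem pvTake13Append {T : Type} (X Y : List T) :
    (X.take 13 ++ Y).take 13 = (X ++ Y).take 13 := by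
  by_cases hx : X.length ≤ 13
  · rw [List.take_of_length_le hx]
  · rw [List.take_append, List.take_append, List.take_take]
    simp only [List.length_take]
    rw [show min (13 : Nat) 13 = 13 from rfl,
      show 13 - min 13 X.length = 13 - X.length from by omega]

-- two-level capped collection (row loop with early break, column loop inside)
theorem pvCapFoldOuter {A B T : Type} (P : A → B → Prop) [∀ a, DecidablePred (P a)]
    (e : A → B → T) (l : List A) (inner : A → List B) (acc : List T) (h : acc.length ≤ 13) :
    l.foldl (fun a r => if a.length ≥ 13 then a else
        (inner r).foldl (fun a x => if a.length ≥ 13 then a else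
          if P r x then a ++ [e r x] else a) a) acc
      = (acc ++ l.flatMap fun r =>
          (inner r).filterMap fun x => if P r x then some (e r x) else none).take 13 := by
  induction l generalizing acc with
  | nil => simp [List.take_of_length_le h]
  | cons r l ih =>
    simp only [List.foldl_cons, List.flatMap_cons]
    by_cases hfull : acc.length ≥ 13
    · rw [if_pos hfull, ih acc h]
      rw [List.take_append, List.take_append, List.take_of_length_le h]
      have h0 : 13 - acc.length = 0 := by omega
      rw [h0]
      simp
    · rw [if_neg hfull, pvCapFold (P r) (e r) (inner r) acc (by omega)]
      rw [ih _ (by rw [List.length_take]; omega)]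
      rw [← List.append_assoc, pvTake13Append, List.append_assoc]

-- the capped collection is the 13-element prefix of the full list
theorem pvMatches13_eq_take (b : List (List Int)) (rows cols : Int) :
    pvMatches13B b rows cols = (pvMatchesB b rows cols).take 13 := by
  unfold pvMatches13B pvMatchesB
  rw [pvCapFoldOuter
        (fun r c => pvCellB b r c = pvCellB b r (c+1) ∧ pvCellB b r (c+1) = pvCellB b r (c+2))
        (fun r c => (r, c, true)) (PySem.List.pyRange 0 rows 1)
        (fun _ => PySem.List.pyRange 0 (cols - 2) 1) [] (by simp)]
  rw [pvCapFoldOuter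
        (fun r c => pvCellB b r c = pvCellB b (r+1) c ∧ pvCellB b (r+1) c = pvCellB b (r+2) c)
        (fun r c => (r, c, false)) (PySem.List.pyRange 0 (rows - 2) 1)
        (fun _ => PySem.List.pyRange 0 cols 1) _ (by rw [List.length_take]; omega)]
  rw [List.nil_append, pvTake13Append]

-- the full list of matching triples has no duplicates
theorem pvMatchesB_nodup (b : List (List Int)) (rows cols : Int) :
    (pvMatchesB b rows cols).Nodup := by
  have hmemH : ∀ (r : Int) (t : Int × Int × Bool),
      t ∈ (PySem.List.pyRange 0 (cols - 2) 1).filterMap (fun c =>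
        if pvCellB b r c = pvCellB b r (c+1) ∧ pvCellB b r (c+1) = pvCellB b r (c+2)
        then some (r, c, true) else none) → t.1 = r ∧ t.2.2 = true := by
    intro r t ht
    simp only [List.mem_filterMap] at ht
    obtain ⟨c, _, hc⟩ := ht
    split_ifs at hc
    cases hc
    exact ⟨rfl, rfl⟩
  have hmemV : ∀ (r : Int) (t : Int × Int × Bool),
      t ∈ (PySem.List.pyRange 0 cols 1).filterMap (fun c =>
        if pvCellB b r c = pvCellB b (r+1) c ∧ pvCellB b (r+1) c = pvCellB b (r+2) c
        then some (r, c, false) else none) → t.1 = r ∧ t.2.2 = false := by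
    intro r t ht
    simp only [List.mem_filterMap] at ht
    obtain ⟨c, _, hc⟩ := ht
    split_ifs at hc
    cases hc
    exact ⟨rfl, rfl⟩
  unfold pvMatchesB
  apply List.Nodup.append
  · rw [List.nodup_flatMap]
    refine ⟨fun r _ => ?_, ?_⟩
    · apply List.Nodup.filterMap _ (PySem.List.nodup_pyRange_one _ _)
      intro a a' t ht ht'
      simp only [Option.mem_def] at ht ht'
      split_ifs at ht ht'
      · rw [Option.some_inj] at ht ht'
        rw [← ht] at ht'
        have := congrArg (fun q => q.2.1) ht'
        simpa using this.symm
    · apply (PySem.List.pairwise_lt_pyRange_one 0 rows).imp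
      intro r r' hlt t ht ht'
      have h1 := (hmemH r t ht).1
      have h2 := (hmemH r' t ht').1
      omega
  · rw [List.nodup_flatMap]
    refine ⟨fun r _ => ?_, ?_⟩
    · apply List.Nodup.filterMap _ (PySem.List.nodup_pyRange_one _ _)
      intro a a' t ht ht'
      simp only [Option.mem_def] at ht ht'
      split_ifs at ht ht'
      · rw [Option.some_inj] at ht ht'
        rw [← ht] at ht'
        have := congrArg (fun q => q.2.1) ht'
        simpa using this.symm
    · apply (PySem.List.pairwise_lt_pyRange_one 0 (rows - 2)).imp
      intro r r' hlt t ht ht'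
      have h1 := (hmemV r t ht).1
      have h2 := (hmemV r' t ht').1
      omega
  · intro t ht ht'
    simp only [List.mem_flatMap] at ht ht'
    obtain ⟨r, _, hr⟩ := ht
    obtain ⟨r', _, hr'⟩ := ht'
    have h1 := (hmemH r t hr).2
    have h2 := (hmemV r' t hr').2
    rw [h1] at h2
    cases h2

-- the at most 12 triples that can run through a given cell
def pvBad (p : Int × Int) : List (Int × Int × Bool) :=
  [(p.1, p.2 - 2, true), (p.1, p.2 - 1, true), (p.1, p.2, true),
   (p.1 - 2, p.2, false), (p.1 - 1, p.2, false), (p.1, p.2, false)]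

theorem pvMem_bad (p : Int × Int) (t : Int × Int × Bool) (h : p ∈ pvCellsB t) : t ∈ pvBad p := by
  obtain ⟨r, c, d⟩ := t
  cases d <;>
    simp only [pvCellsB, pvBad, List.mem_cons, List.not_mem_nil, or_false, Prod.mk.injEq] at h ⊢
  · rcases h with ⟨h1, h2⟩ | ⟨h1, h2⟩ | ⟨h1, h2⟩
    · exact Or.inr (Or.inr (Or.inr (Or.inr (Or.inr ⟨by omega, by omega, trivial⟩))))
    · exact Or.inr (Or.inr (Or.inr (Or.inr (Or.inl ⟨by omega, by omega, trivial⟩))))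
    · exact Or.inr (Or.inr (Or.inr (Or.inl ⟨by omega, by omega, trivial⟩)))
  · rcases h with ⟨h1, h2⟩ | ⟨h1, h2⟩ | ⟨h1, h2⟩
    · exact Or.inr (Or.inr (Or.inl ⟨by omega, by omega, trivial⟩))
    · exact Or.inr (Or.inl ⟨by omega, by omega, trivial⟩)
    · exact Or.inl ⟨by omega, by omega, trivial⟩

-- a list of 13 distinct matching triples cannot all run through two cells
theorem pvNodupSubsetLen {T : Type} [DecidableEq T] (l l' : List T)
    (h : l.Nodup) (hs : l ⊆ l') : l.length ≤ l'.length := by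
  have h2 : l.toFinset ⊆ l'.toFinset := by
    intro x hx
    simp only [List.mem_toFinset] at hx ⊢
    exact hs hx
  have h3 := Finset.card_le_card h2
  have h4 := List.toFinset_card_le l'
  rw [List.toFinset_card_of_nodup h] at h3
  omega

-- reading a cell of the swapped copy = the no-copy swap-aware read of the original
theorem pvSwap_read (board : List (List Int)) (r1 c1 r2 c2 : Int)
    (hPre : Pre_find_valid_swap board)
    (hr1 : 0 ≤ r1) (hr1' : r1 < (board.length : Int))
    (hc1 : 0 ≤ c1) (hc1' : c1 < ((board.headD []).length : Int))
    (hr2 : 0 ≤ r2) (hr2' : r2 < (board.length : Int))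
    (hc2 : 0 ≤ c2) (hc2' : c2 < ((board.headD []).length : Int))
    (hne : ¬(r1 = r2 ∧ c1 = c2))
    (r c : Int) (hr : 0 ≤ r) (hc : 0 ≤ c) :
    pvCellA (pvSwapA board r1 c1 r2 c2) r c = pvValB board r1 c1 r2 c2 r c := by
  have hlen1 : r1.toNat < board.length := by omega
  have hlen2 : r2.toNat < (pvSetA board r1 c1 (pvCellA board r2 c2)).length := by
    unfold pvSetA; simp only [List.length_set]; omega
  have hrow1 : c1.toNat < (board[r1.toNat]?.getD []).length := by
    have := pvRowLen board hPre r1.toNat (by omega); omega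
  have hrow2 : c2.toNat <
      ((pvSetA board r1 c1 (pvCellA board r2 c2))[r2.toNat]?.getD []).length := by
    unfold pvSetA
    rw [pvRowEq board r1 hr1, List.getElem?_set]
    by_cases h : r1.toNat = r2.toNat
    · rw [if_pos h, if_pos (by omega)]
      simp only [Option.getD_some, List.length_set]
      have := pvRowLen board hPre r1.toNat (by omega); omega
    · rw [if_neg h]
      have := pvRowLen board hPre r2.toNat (by omega); omega
  unfold pvSwapA
  rw [pvCellA_setA _ r2 c2 _ hr2 hlen2 hc2 hrow2 r c hr hc]
  rw [pvCellA_setA board r1 c1 _ hr1 hlen1 hc1 hrow1 r c hr hc]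
  unfold pvValB
  have ecb : pvCellB = pvCellA := rfl
  rw [ecb]
  by_cases h2 : r = r2 ∧ c = c2
  · rw [if_pos h2, if_neg (by rintro ⟨h, h'⟩; exact hne (by constructor <;> omega)), if_pos h2]
  · rw [if_neg h2]
    by_cases h1 : r = r1 ∧ c = c1
    · rw [if_pos h1, if_pos h1]
    · rw [if_neg h1, if_neg h1, if_neg h2]

-- the heart: A's full rescan of the swapped copy = B's survives-or-creates local test
theorem pvTest_eq (board : List (List Int)) (r1 c1 r2 c2 : Int)
    (hPre : Pre_find_valid_swap board)
    (hr1 : 0 ≤ r1) (hr1' : r1 < (board.length : Int))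
    (hc1 : 0 ≤ c1) (hc1' : c1 < ((board.headD []).length : Int))
    (hr2 : 0 ≤ r2) (hr2' : r2 < (board.length : Int))
    (hc2 : 0 ≤ c2) (hc2' : c2 < ((board.headD []).length : Int))
    (hne : ¬(r1 = r2 ∧ c1 = c2)) :
    pvIsMatchA (pvSwapA board r1 c1 r2 c2) (board.length : Int) ((board.headD []).length : Int) =
      (pvSurvivesB (pvMatches13B board (board.length : Int) ((board.headD []).length : Int)) r1 c1 r2 c2 ||
       pvCreatesB board (board.length : Int) ((board.headD []).length : Int) r1 c1 r2 c2) := by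
  set R := (board.length : Int) with hR
  set C := ((board.headD []).length : Int) with hC
  have hread := pvSwap_read board r1 c1 r2 c2 hPre hr1 hr1' hc1 hc1' hr2 hr2' hc2 hc2' hne
  -- HM / VM of the swapped copy = the virtual-read versions
  have hHM : ∀ r c, 0 ≤ r → 0 ≤ c →
      (pvHM (pvSwapA board r1 c1 r2 c2) r c ↔ pvHMv board r1 c1 r2 c2 r c) := by
    intro r c hr hc
    unfold pvHM pvHMv
    rw [hread r c hr hc, hread r (c+1) hr (by omega), hread r (c+2) hr (by omega)]
  have hVM : ∀ r c, 0 ≤ r → 0 ≤ c →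
      (pvVM (pvSwapA board r1 c1 r2 c2) r c ↔ pvVMv board r1 c1 r2 c2 r c) := by
    intro r c hr hc
    unfold pvVM pvVMv
    rw [hread r c hr hc, hread (r+1) c (by omega) hc, hread (r+2) c (by omega) hc]
  -- a virtual read away from both swapped cells is an original read
  have hAway : ∀ r c, ¬(r = r1 ∧ c = c1) → ¬(r = r2 ∧ c = c2) →
      pvValB board r1 c1 r2 c2 r c = pvCellA board r c := by
    intro r c h1 h2
    unfold pvValB
    rw [if_neg h1, if_neg h2]
    rfl
  rw [Bool.eq_iff_iff]
  rw [pvIsMatchA_iff]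
  rw [Bool.or_eq_true]
  -- survives unfolded
  have hsurv : pvSurvivesB (pvMatches13B board R C) r1 c1 r2 c2 = true ↔
      ∃ t ∈ pvMatchesB board R C, (r1, c1) ∉ pvCellsB t ∧ (r2, c2) ∉ pvCellsB t := by
    rw [pvMatches13_eq_take]
    unfold pvSurvivesB
    by_cases hlen : ((pvMatchesB board R C).take 13).length ≥ 13
    · rw [if_pos hlen]
      refine ⟨fun _ => ?_, fun _ => rfl⟩
      by_contra hno
      push Not at hno
      have hsub : (pvMatchesB board R C).take 13 ⊆ pvBad (r1, c1) ++ pvBad (r2, c2) := by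
        intro t ht
        have htf := List.take_subset _ _ ht
        have hhit := hno t htf
        by_cases h1 : (r1, c1) ∈ pvCellsB t
        · exact List.mem_append_left _ (pvMem_bad _ _ h1)
        · exact List.mem_append_right _ (pvMem_bad _ _ (hhit h1))
      have hnd : ((pvMatchesB board R C).take 13).Nodup :=
        (List.take_sublist _ _).nodup (pvMatchesB_nodup board R C)
      have := pvNodupSubsetLen _ _ hnd hsub
      simp only [pvBad, List.length_append, List.length_cons, List.length_nil,
        List.length_take] at this
      rw [List.length_take] at hlen
      omega
    · rw [if_neg hlen]
      have heq : (pvMatchesB board R C).take 13 = pvMatchesB board R C := by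
        rw [List.length_take] at hlen
        exact List.take_of_length_le (by omega)
      rw [heq]
      simp only [List.any_eq_true, Bool.and_eq_true, Bool.not_eq_true', ← Bool.not_eq_true,
        List.contains_iff_mem]
  -- creates unfolded
  have hcrea : pvCreatesB board R C r1 c1 r2 c2 = true ↔
      ∃ p ∈ [(r1, c1), (r2, c2)],
        (∃ cc, p.2 - 2 ≤ cc ∧ cc < p.2 + 1 ∧ 0 ≤ cc ∧ cc + 2 < C ∧
            pvHMv board r1 c1 r2 c2 p.1 cc) ∨
        (∃ rr, p.1 - 2 ≤ rr ∧ rr < p.1 + 1 ∧ 0 ≤ rr ∧ rr + 2 < R ∧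
            pvVMv board r1 c1 r2 c2 rr p.2) := by
    unfold pvCreatesB
    simp only [List.any_eq_true, Bool.or_eq_true, Bool.and_eq_true, decide_eq_true_eq,
      beq_iff_eq, PySem.List.mem_pyRange_one, pvHMv, pvVMv]
    constructor
    · rintro ⟨p, hp, ⟨cc, ⟨hcl, hcu⟩, ⟨h0, h2⟩, hm⟩ | ⟨rr, ⟨hrl, hru⟩, ⟨h0, h2⟩, hm⟩⟩
      · exact ⟨p, hp, Or.inl ⟨cc, hcl, hcu, h0, h2, hm⟩⟩
      · exact ⟨p, hp, Or.inr ⟨rr, hrl, hru, h0, h2, hm⟩⟩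
    · rintro ⟨p, hp, ⟨cc, hcl, hcu, h0, h2, hm⟩ | ⟨rr, hrl, hru, h0, h2, hm⟩⟩
      · exact ⟨p, hp, Or.inl ⟨cc, ⟨hcl, hcu⟩, ⟨h0, h2⟩, hm⟩⟩
      · exact ⟨p, hp, Or.inr ⟨rr, ⟨hrl, hru⟩, ⟨h0, h2⟩, hm⟩⟩
  rw [hsurv, hcrea]
  constructor
  · rintro (⟨r, c, htri, hm⟩ | ⟨r, c, htri, hm⟩)
    · obtain ⟨h0r, h1r, h0c, h2c⟩ := htri
      rw [hHM r c h0r h0c] at hm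
      by_cases hin1 : r = r1 ∧ c ≤ c1 ∧ c1 ≤ c + 2
      · refine Or.inr ⟨(r1, c1), by simp, Or.inl ⟨c, by omega, by omega, by omega, by omega, ?_⟩⟩
        exact hin1.1 ▸ hm
      · by_cases hin2 : r = r2 ∧ c ≤ c2 ∧ c2 ≤ c + 2
        · refine Or.inr ⟨(r2, c2), by simp, Or.inl ⟨c, by omega, by omega, by omega, by omega, ?_⟩⟩
          exact hin2.1 ▸ hm
        · -- triple away from both swapped cells: it is an original match that survives
          refine Or.inl ⟨(r, c, true), ?_, ?_, ?_⟩
          · rw [pvMatchesB_mem]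
            refine Or.inl ⟨r, c, ⟨h0r, h1r, h0c, h2c⟩, ?_, rfl⟩
            unfold pvHMv at hm
            rw [hAway r c (by rintro ⟨ha, hb⟩; exact hin1 ⟨ha, by omega⟩)
                  (by rintro ⟨ha, hb⟩; exact hin2 ⟨ha, by omega⟩),
                hAway r (c+1) (by rintro ⟨ha, hb⟩; exact hin1 ⟨ha, by omega⟩)
                  (by rintro ⟨ha, hb⟩; exact hin2 ⟨ha, by omega⟩),
                hAway r (c+2) (by rintro ⟨ha, hb⟩; exact hin1 ⟨ha, by omega⟩)
                  (by rintro ⟨ha, hb⟩; exact hin2 ⟨ha, by omega⟩)] at hm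
            exact hm
          · unfold pvCellsB
            simp only [List.mem_cons, List.not_mem_nil, or_false, Prod.mk.injEq, not_or]
            refine ⟨?_, ?_, ?_⟩ <;> rintro ⟨hh, hh'⟩ <;> exact hin1 (by omega)
          · unfold pvCellsB
            simp only [List.mem_cons, List.not_mem_nil, or_false, Prod.mk.injEq, not_or]
            refine ⟨?_, ?_, ?_⟩ <;> rintro ⟨hh, hh'⟩ <;> exact hin2 (by omega)
    · obtain ⟨h0r, h2r, h0c, h1c⟩ := htri
      rw [hVM r c h0r h0c] at hm
      by_cases hin1 : c = c1 ∧ r ≤ r1 ∧ r1 ≤ r + 2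
      · refine Or.inr ⟨(r1, c1), by simp, Or.inr ⟨r, by omega, by omega, by omega, by omega, ?_⟩⟩
        exact hin1.1 ▸ hm
      · by_cases hin2 : c = c2 ∧ r ≤ r2 ∧ r2 ≤ r + 2
        · refine Or.inr ⟨(r2, c2), by simp, Or.inr ⟨r, by omega, by omega, by omega, by omega, ?_⟩⟩
          exact hin2.1 ▸ hm
        · refine Or.inl ⟨(r, c, false), ?_, ?_, ?_⟩
          · rw [pvMatchesB_mem]
            refine Or.inr ⟨r, c, ⟨h0r, h2r, h0c, h1c⟩, ?_, rfl⟩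
            unfold pvVMv at hm
            rw [hAway r c (by rintro ⟨ha, hb⟩; exact hin1 ⟨hb, by omega⟩)
                  (by rintro ⟨ha, hb⟩; exact hin2 ⟨hb, by omega⟩),
                hAway (r+1) c (by rintro ⟨ha, hb⟩; exact hin1 ⟨hb, by omega⟩)
                  (by rintro ⟨ha, hb⟩; exact hin2 ⟨hb, by omega⟩),
                hAway (r+2) c (by rintro ⟨ha, hb⟩; exact hin1 ⟨hb, by omega⟩)
                  (by rintro ⟨ha, hb⟩; exact hin2 ⟨hb, by omega⟩)] at hm
            exact hm
          · unfold pvCellsB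
            simp only [List.mem_cons, List.not_mem_nil, or_false, Prod.mk.injEq, not_or]
            refine ⟨?_, ?_, ?_⟩ <;> rintro ⟨hh, hh'⟩ <;> exact hin1 (by omega)
          · unfold pvCellsB
            simp only [List.mem_cons, List.not_mem_nil, or_false, Prod.mk.injEq, not_or]
            refine ⟨?_, ?_, ?_⟩ <;> rintro ⟨hh, hh'⟩ <;> exact hin2 (by omega)
  · rintro (⟨t, tmem, tn1, tn2⟩ | ⟨p, pmem, hline⟩)
    · rw [pvMatchesB_mem] at tmem
      rcases tmem with ⟨r, c, htri, hm, rfl⟩ | ⟨r, c, htri, hm, rfl⟩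
      · refine Or.inl ⟨r, c, htri, ?_⟩
        unfold pvCellsB at tn1 tn2
        simp only [List.mem_cons, List.not_mem_nil, or_false, Prod.mk.injEq, not_or] at tn1 tn2
        rw [hHM r c htri.1 htri.2.2.1]
        unfold pvHMv
        rw [hAway r c (by rintro ⟨hh, hh'⟩; exact tn1.1 ⟨hh.symm, hh'.symm⟩)
              (by rintro ⟨hh, hh'⟩; exact tn2.1 ⟨hh.symm, hh'.symm⟩),
            hAway r (c+1) (by rintro ⟨hh, hh'⟩; exact tn1.2.1 ⟨hh.symm, hh'.symm⟩)
              (by rintro ⟨hh, hh'⟩; exact tn2.2.1 ⟨hh.symm, hh'.symm⟩),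
            hAway r (c+2) (by rintro ⟨hh, hh'⟩; exact tn1.2.2 ⟨hh.symm, hh'.symm⟩)
              (by rintro ⟨hh, hh'⟩; exact tn2.2.2 ⟨hh.symm, hh'.symm⟩)]
        exact hm
      · refine Or.inr ⟨r, c, htri, ?_⟩
        unfold pvCellsB at tn1 tn2
        simp only [List.mem_cons, List.not_mem_nil, or_false, Prod.mk.injEq, not_or] at tn1 tn2
        rw [hVM r c htri.1 htri.2.2.1]
        unfold pvVMv
        rw [hAway r c (by rintro ⟨hh, hh'⟩; exact tn1.1 ⟨hh.symm, hh'.symm⟩)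
              (by rintro ⟨hh, hh'⟩; exact tn2.1 ⟨hh.symm, hh'.symm⟩),
            hAway (r+1) c (by rintro ⟨hh, hh'⟩; exact tn1.2.1 ⟨hh.symm, hh'.symm⟩)
              (by rintro ⟨hh, hh'⟩; exact tn2.2.1 ⟨hh.symm, hh'.symm⟩),
            hAway (r+2) c (by rintro ⟨hh, hh'⟩; exact tn1.2.2 ⟨hh.symm, hh'.symm⟩)
              (by rintro ⟨hh, hh'⟩; exact tn2.2.2 ⟨hh.symm, hh'.symm⟩)]
        exact hm
    · have hp : (0 ≤ p.1 ∧ p.1 < R) ∧ (0 ≤ p.2 ∧ p.2 < C) := by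
        simp only [List.mem_cons, List.not_mem_nil, or_false] at pmem
        rcases pmem with rfl | rfl <;> exact ⟨⟨by omega, by omega⟩, by omega, by omega⟩
      rcases hline with ⟨cc, _, _, h0, h2, hm⟩ | ⟨rr, _, _, h0, h2, hm⟩
      · refine Or.inl ⟨p.1, cc, ⟨hp.1.1, hp.1.2, h0, h2⟩, ?_⟩
        rw [hHM p.1 cc hp.1.1 h0]
        exact hm
      · refine Or.inr ⟨rr, p.2, ⟨h0, h2, hp.2.1, hp.2.2⟩, ?_⟩
        rw [hVM rr p.2 h0 hp.2.1]
        exact hm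

theorem pvFindSome?_congr {α β : Type} (l : List α) (f g : α → Option β)
    (h : ∀ x ∈ l, f x = g x) : l.findSome? f = l.findSome? g := by
  induction l with
  | nil => rfl
  | cons a l ih =>
    simp only [List.findSome?_cons, h a (List.mem_cons_self)]
    cases g a with
    | none => exact ih fun x hx => h x (List.mem_cons_of_mem _ hx)
    | some b => rfl

-- both ports' per-candidate answers agree, for every in-range candidate cell
theorem pvBranch_eq (board : List (List Int)) (hPre : Pre_find_valid_swap board)
    (r c : Int) (hr : 0 ≤ r) (hr' : r < (board.length : Int))
    (hc : 0 ≤ c) (hc' : c < ((board.headD []).length : Int)) :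
    ((if c + 1 < ((board.headD []).length : Int) then
        (if pvValidA (board.length : Int) ((board.headD []).length : Int) r c &&
            pvValidA (board.length : Int) ((board.headD []).length : Int) r (c+1) then
          (if pvIsMatchA (pvSwapA board r c r (c+1)) (board.length : Int) ((board.headD []).length : Int)
           then some [r, c, r, c+1] else none)
         else none)
      else none).orElse fun _ =>
      (if r + 1 < (board.length : Int) then
        (if pvValidA (board.length : Int) ((board.headD []).length : Int) r c &&
            pvValidA (board.length : Int) ((board.headD []).length : Int) (r+1) c then
          (if pvIsMatchA (pvSwapA board r c (r+1) c) (board.length : Int) ((board.headD []).length : Int)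
           then some [r, c, r+1, c] else none)
         else none)
       else none)) =
    (if c + 1 < ((board.headD []).length : Int) ∧
        (pvSurvivesB (pvMatches13B board (board.length : Int) ((board.headD []).length : Int)) r c r (c+1) ||
         pvCreatesB board (board.length : Int) ((board.headD []).length : Int) r c r (c+1)) = true
     then some [r, c, r, c+1]
     else if r + 1 < (board.length : Int) ∧
        (pvSurvivesB (pvMatches13B board (board.length : Int) ((board.headD []).length : Int)) r c (r+1) c ||
         pvCreatesB board (board.length : Int) ((board.headD []).length : Int) r c (r+1) c) = true
     then some [r, c, r+1, c]
     else none) := by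
  set R := (board.length : Int) with hR
  set C := ((board.headD []).length : Int) with hC
  have gv : ∀ a b : Int, 0 ≤ a → a < R → 0 ≤ b → b < C → pvValidA R C a b = true := by
    intro a b h1 h2 h3 h4
    unfold pvValidA
    simp only [Bool.and_eq_true, decide_eq_true_eq]
    omega
  have down :
      (if r + 1 < R then
        (if pvValidA R C r c && pvValidA R C (r+1) c then
          (if pvIsMatchA (pvSwapA board r c (r+1) c) R C then some [r, c, r+1, c] else none)
         else none)
       else none) =
      (if r + 1 < R ∧
          (pvSurvivesB (pvMatches13B board R C) r c (r+1) c ||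
           pvCreatesB board R C r c (r+1) c) = true
       then some [r, c, r+1, c] else none) := by
    by_cases h2 : r + 1 < R
    · rw [if_pos h2, if_pos (by rw [gv r c hr hr' hc hc', gv (r+1) c (by omega) h2 hc hc']; rfl)]
      rw [pvTest_eq board r c (r+1) c hPre hr hr' hc hc' (by omega) h2 hc hc' (by omega)]
      by_cases ht : (pvSurvivesB (pvMatches13B board R C) r c (r+1) c ||
          pvCreatesB board R C r c (r+1) c) = true
      · have hcond : r + 1 < R ∧ (pvSurvivesB (pvMatches13B board R C) r c (r+1) c ||
            pvCreatesB board R C r c (r+1) c) = true := ⟨h2, ht⟩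
        rw [if_pos ht, if_pos hcond]
      · rw [if_neg ht, if_neg (fun hh => ht hh.2)]
    · rw [if_neg h2, if_neg (fun hh => h2 hh.1)]
  by_cases h1 : c + 1 < C
  · rw [if_pos h1, if_pos (by rw [gv r c hr hr' hc hc', gv r (c+1) hr hr' (by omega) h1]; rfl)]
    rw [pvTest_eq board r c r (c+1) hPre hr hr' hc hc' hr hr' (by omega) h1 (by omega)]
    by_cases ht : (pvSurvivesB (pvMatches13B board R C) r c r (c+1) ||
        pvCreatesB board R C r c r (c+1)) = true
    · have hcond : c + 1 < C ∧ (pvSurvivesB (pvMatches13B board R C) r c r (c+1) ||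
          pvCreatesB board R C r c r (c+1)) = true := ⟨h1, ht⟩
      rw [if_pos ht, Option.orElse_some, if_pos hcond]
    · rw [if_neg ht, Option.orElse_none,
        if_neg (show ¬(c + 1 < C ∧ (pvSurvivesB (pvMatches13B board R C) r c r (c+1) ||
          pvCreatesB board R C r c r (c+1)) = true) from fun hh => ht hh.2), down]
  · rw [if_neg h1, Option.orElse_none,
      if_neg (show ¬(c + 1 < C ∧ (pvSurvivesB (pvMatches13B board R C) r c r (c+1) ||
        pvCreatesB board R C r c r (c+1)) = true) from fun hh => h1 hh.1), down]

-- ===== VERDICT (by name: the statement is the Claim_ definition above) =====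
theorem find_valid_swap_spec : Claim_equal_find_valid_swap := by
  intro board _hDom hPre
  unfold Spec_find_valid_swap
  cases board with
  | nil => rfl
  | cons b0 rest =>
    unfold find_valid_swap find_valid_swap_alt
    simp only [PySem.List.len_eq, PySem.List.pyGetD_zero_cons]
    apply pvFindSome?_congr
    intro r hr
    apply pvFindSome?_congr
    intro c hc
    rw [PySem.List.mem_pyRange_one] at hr hc
    have hb0 : ((b0 :: rest).headD []) = b0 := rfl
    have := pvBranch_eq (b0 :: rest) hPre r c hr.1 (by simpa using hr.2) hc.1
      (by rw [hb0]; simpa using hc.2)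
    rw [hb0] at this
    simpa using this
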